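-- pv_equiv track=rewrite | github.com/Center-for-Research-Libraries/crl-serials-validator | crl_lib/year_utilities.py | remove_unlikely_years
-- ===== SOURCE A (Python) =====
-- def remove_unlikely_years(years):
--     previous_year = 0
--     new_years = []
--     for year in years:
--         if (year - 100) > previous_year:
--             new_years = []
--         new_years.append(year)
--         previous_year = year
--     return new_years
-- ===== SOURCE B (Python) =====
-- def remove_unlikely_years(years):
--     out = []
--     for y in reversed(years):
--         if out and out[-1] - y > 100:
--             break
--         out.append(y)
--     out.reverse()
--     return out
-- ===== Notes on version B (the rewrite author's own statement) =====
-- stated objective: alternative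
-- what changed: B walks the list back-to-front, collecting years until the first >100 gap and then reversing once, instead of A's forward pass that resets an accumulator list at every gap.
import Mathlib
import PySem

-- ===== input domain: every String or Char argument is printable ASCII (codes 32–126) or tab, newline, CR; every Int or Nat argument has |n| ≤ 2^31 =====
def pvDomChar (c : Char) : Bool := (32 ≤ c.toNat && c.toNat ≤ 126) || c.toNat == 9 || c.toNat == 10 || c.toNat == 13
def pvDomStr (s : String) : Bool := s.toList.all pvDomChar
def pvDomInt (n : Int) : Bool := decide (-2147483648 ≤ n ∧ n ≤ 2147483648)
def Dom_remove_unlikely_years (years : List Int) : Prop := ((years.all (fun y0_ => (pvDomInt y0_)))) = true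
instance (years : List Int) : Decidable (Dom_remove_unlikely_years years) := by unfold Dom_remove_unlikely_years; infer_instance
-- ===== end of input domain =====

-- B walks the list back-to-front, prepending years and stopping at the first >100 gap,
-- instead of A's forward pass that resets an accumulator at every gap. Return values proved equal.

-- ===== PORT A =====
-- one loop step of A: reset new_years on a >100 jump, append year, remember prev
def pvStepA (st : Int × List Int) (year : Int) : Int × List Int :=
  (year, (if year - 100 > st.1 then [] else st.2) ++ [year])

def remove_unlikely_years (years : List Int) : List Int :=
  (years.foldl pvStepA (0, [])).2

-- ===== PORT B =====
-- B's loop over reversed(years): break at the first gap, otherwise out.append(y); reverse at the end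
def pvLoopB (out : List Int) : List Int → List Int
  | [] => out
  | y :: ys => if out.getLast?.any (fun h => decide (h - y > 100)) then out
               else pvLoopB (out ++ [y]) ys

def remove_unlikely_years_alt (years : List Int) : List Int :=
  (pvLoopB [] years.reverse).reverse

-- ===== PRECONDITION & SPEC =====
def Spec_remove_unlikely_years (years : List Int) (out : List Int) : Prop := out = remove_unlikely_years_alt years
instance (years : List Int) (out : List Int) : Decidable (Spec_remove_unlikely_years years out) := by unfold Spec_remove_unlikely_years; infer_instance

-- ===== CLAIM (what is proved, stated in full; the proofs are below) =====
def Claim_equal_remove_unlikely_years : Prop := ∀ (years : List Int), Dom_remove_unlikely_years years → Spec_remove_unlikely_years years (remove_unlikely_years years)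

-- ===== LEMMAS AND PROOFS =====

-- proof helper: pvLoopB with the accumulator kept reversed (prepend instead of append)
def pvLoopRev (out : List Int) : List Int → List Int
  | [] => out
  | y :: ys => if out.head?.any (fun h => decide (h - y > 100)) then out
               else pvLoopRev (y :: out) ys

lemma pvLoopB_rev (l a : List Int) : pvLoopB a l = (pvLoopRev a.reverse l).reverse := by
  induction l generalizing a with
  | nil => simp [pvLoopB, pvLoopRev]
  | cons y ys ih =>
    rw [pvLoopB, pvLoopRev, List.head?_reverse]
    by_cases hc : (a.getLast?.any (fun h => decide (h - y > 100))) = true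
    · simp [hc]
    · simp only [hc, Bool.false_eq_true, ite_false, ih]
      rw [List.reverse_append, List.reverse_singleton, List.singleton_append]

lemma pvFoldA_fst (l : List Int) (s : Int × List Int) (y : Int) :
    (List.foldl pvStepA s (l ++ [y])).1 = y := by
  simp [List.foldl_append, pvStepA]

lemma pvLoopB_eq (l : List Int) (h : Int) (t : List Int) :
    pvLoopRev (h :: t) l.reverse = (List.foldl pvStepA (0, []) (l ++ [h])).2 ++ t := by
  induction l using List.reverseRecOn generalizing h t with
  | nil => simp [pvLoopRev, pvStepA]
  | append_singleton l' y ih =>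
    rw [List.reverse_append, List.reverse_singleton, List.singleton_append, pvLoopRev]
    have hfst : (List.foldl pvStepA ((0 : Int), ([] : List Int)) (l' ++ [y])).1 = y :=
      pvFoldA_fst l' _ y
    have hsplit : (l' ++ [y]) ++ [h] = l' ++ [y] ++ [h] := rfl
    rw [hsplit, List.foldl_append (l := l' ++ [y]) (l' := [h])]
    by_cases hc : h - y > 100
    · simp [hc, List.foldl, pvStepA]
      omega
    · have hlt : ¬ h - 100 > (List.foldl pvStepA ((0 : Int), ([] : List Int)) (l' ++ [y])).1 := by
        rw [hfst]; omega
      simp only [List.head?, Option.any_some, decide_eq_true_eq, hc,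
        List.foldl, pvStepA, if_neg hlt]
      rw [ih y (h :: t)]
      simp

-- ===== VERDICT (by name: the statement is the Claim_ definition above) =====
theorem remove_unlikely_years_spec : Claim_equal_remove_unlikely_years := by
  intro years _
  unfold Spec_remove_unlikely_years remove_unlikely_years remove_unlikely_years_alt
  induction years using List.reverseRecOn with
  | nil => rfl
  | append_singleton l h _ =>
    rw [pvLoopB_rev, List.reverse_reverse, List.reverse_nil]
    rw [List.reverse_append, List.reverse_singleton, List.singleton_append, pvLoopRev]
    simp only [List.head?, Option.any_none, if_neg Bool.false_ne_true]
    rw [pvLoopB_eq l h []]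
    simp
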